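-- pv_equiv track=rewrite | github.com/pilotspacex-byte/pilot-spacex | backend/src/pilot_space/application/services/note/markdown_chunker.py | _build_heading_hierarchy
-- ===== SOURCE A (Python) =====
-- def _build_heading_hierarchy(
--     boundaries: list[tuple[int, str, int]],
--     current_idx: int,
-- ) -> list[str]:
--     """Build the heading hierarchy for a chunk at current_idx.
--
--     Walks backward from current_idx to collect the nearest ancestor at each
--     lower heading level. E.g., for an h3, collects the nearest h2 and h1.
--     """
--     if current_idx < 0 or current_idx >= len(boundaries):
--         return []
--
--     _, current_heading, current_level = boundaries[current_idx]
--     if current_level <= 1: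
--         return [current_heading] if current_heading else []
--
--     ancestors: list[str] = []
--     seen_levels: set[int] = set()
--     for j in range(current_idx - 1, -1, -1):
--         _, ancestor_heading, ancestor_level = boundaries[j]
--         if ancestor_level < current_level and ancestor_level not in seen_levels:
--             ancestors.append(ancestor_heading)
--             seen_levels.add(ancestor_level)
--             if ancestor_level == 1:
--                 break
--
--     ancestors.reverse()
--     if current_heading:
--         ancestors.append(current_heading)
--     return ancestors
-- ===== SOURCE B (Python) =====
-- def _build_heading_hierarchy(
--     boundaries: list[tuple[int, str, int]],
--     current_idx: int,
-- ) -> list[str]: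
--     """Build the heading hierarchy for a chunk at current_idx.
--
--     Single forward pass: keep an order-maintaining dict mapping each
--     heading level (< current level) to its most recent heading; a level-1
--     heading resets the dict, since nothing before it can be an ancestor.
--     """
--     if current_idx < 0 or current_idx >= len(boundaries):
--         return []
--
--     _, current_heading, current_level = boundaries[current_idx]
--     if current_level <= 1:
--         return [current_heading] if current_heading else []
--
--     nearest: dict[int, str] = {}
--     for _, heading, level in boundaries[:current_idx]:
--         if level == 1:
--             nearest = {1: heading}
--         elif level < current_level:
--             nearest.pop(level, None)
--             nearest[level] = heading
--
--     hierarchy = list(nearest.values())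
--     if current_heading:
--         hierarchy.append(current_heading)
--     return hierarchy
-- ===== Notes on version B (the rewrite author's own statement) =====
-- stated objective: alternative
-- what changed: Replaces A's backward scan with a seen-set and break by a single forward pass over boundaries[:current_idx] that maintains an order-preserving dict from heading level to its nearest heading, resetting the dict at every level-1 heading.
import Mathlib
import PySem

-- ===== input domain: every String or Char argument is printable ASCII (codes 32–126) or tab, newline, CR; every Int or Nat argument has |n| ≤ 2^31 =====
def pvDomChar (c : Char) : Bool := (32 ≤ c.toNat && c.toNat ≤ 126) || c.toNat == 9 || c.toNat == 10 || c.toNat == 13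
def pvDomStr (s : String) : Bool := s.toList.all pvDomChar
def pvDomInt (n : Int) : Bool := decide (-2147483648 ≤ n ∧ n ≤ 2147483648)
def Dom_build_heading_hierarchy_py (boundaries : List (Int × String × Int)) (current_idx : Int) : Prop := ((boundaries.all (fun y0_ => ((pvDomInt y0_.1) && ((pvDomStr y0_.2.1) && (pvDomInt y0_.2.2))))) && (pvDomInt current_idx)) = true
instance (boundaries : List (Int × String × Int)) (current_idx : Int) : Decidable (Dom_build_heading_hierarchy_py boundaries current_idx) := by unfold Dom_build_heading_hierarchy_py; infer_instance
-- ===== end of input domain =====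

-- B replaces A's backward scan + seen-set + break by one forward pass keeping an
-- order-preserving dict of the nearest heading per lower level (reset at level 1);
-- same cost, alternative algorithm.


-- ===== PORT A =====
-- the 'for j in range(current_idx-1,-1,-1)' loop with its break, over the index list
def aLoop (boundaries : List (Int × String × Int)) (current_level : Int) :
    List Int → List String → PySem.Set Int → List String
  | [], ancestors, _ => ancestors
  | j :: js, ancestors, seen_levels =>
    match PySem.List.pyGet? boundaries j with
    | none => ancestors  -- unreachable: every j the range yields is in bounds
    | some (_, ancestor_heading, ancestor_level) =>
      if ancestor_level < current_level ∧ seen_levels.contains ancestor_level = false then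
        if ancestor_level = 1 then ancestors ++ [ancestor_heading]  -- break
        else aLoop boundaries current_level js (ancestors ++ [ancestor_heading]) (seen_levels.add ancestor_level)
      else aLoop boundaries current_level js ancestors seen_levels

def build_heading_hierarchy_py (boundaries : List (Int × String × Int)) (current_idx : Int) : List String :=
  if current_idx < 0 ∨ (boundaries.length : Int) ≤ current_idx then []
  else
    match PySem.List.pyGet? boundaries current_idx with
    | none => []  -- unreachable: current_idx is in bounds
    | some (_, current_heading, current_level) =>
      if current_level ≤ 1 then (if current_heading = "" then [] else [current_heading])
      else
        let ancestors := aLoop boundaries current_level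
          (PySem.List.pyRange (current_idx - 1) (-1) (-1)) [] PySem.Set.empty
        let ancestors := ancestors.reverse
        if current_heading = "" then ancestors else ancestors ++ [current_heading]

-- ===== PORT B =====
-- one forward step of B's loop body
def bStep (current_level : Int) (nearest : PySem.Dict Int String) (x : Int × String × Int) :
    PySem.Dict Int String :=
  if x.2.2 = 1 then PySem.Dict.insert PySem.Dict.empty 1 x.2.1
  else if x.2.2 < current_level then (nearest.erase x.2.2).insert x.2.2 x.2.1
  else nearest

def build_heading_hierarchy_py_alt (boundaries : List (Int × String × Int)) (current_idx : Int) : List String :=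
  if current_idx < 0 ∨ (boundaries.length : Int) ≤ current_idx then []
  else
    match PySem.List.pyGet? boundaries current_idx with
    | none => []  -- unreachable: current_idx is in bounds
    | some (_, current_heading, current_level) =>
      if current_level ≤ 1 then (if current_heading = "" then [] else [current_heading])
      else
        let nearest := (PySem.List.slice boundaries none (some current_idx)).foldl
          (bStep current_level) PySem.Dict.empty
        let hierarchy := nearest.values
        if current_heading = "" then hierarchy else hierarchy ++ [current_heading]

-- ===== PRECONDITION & SPEC =====
def Spec_build_heading_hierarchy_py (boundaries : List (Int × String × Int)) (current_idx : Int) (out : List String) : Prop := out = build_heading_hierarchy_py_alt boundaries current_idx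
instance (boundaries : List (Int × String × Int)) (current_idx : Int) (out : List String) : Decidable (Spec_build_heading_hierarchy_py boundaries current_idx out) := by unfold Spec_build_heading_hierarchy_py; infer_instance

-- ===== CLAIM (what is proved, stated in full; the proofs are below) =====
def Claim_equal_build_heading_hierarchy_py : Prop := ∀ (boundaries : List (Int × String × Int)) (current_idx : Int), Dom_build_heading_hierarchy_py boundaries current_idx → Spec_build_heading_hierarchy_py boundaries current_idx (build_heading_hierarchy_py boundaries current_idx)

-- ===== LEMMAS AND PROOFS =====

-- A's backward scan, recast on the element list it reads, keeping (level, heading) pairs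
def aRun (L : Int) : List (Int × String × Int) → PySem.Set Int → List (Int × String)
  | [], _ => []
  | (_, h, v) :: rest, seen =>
    if v < L ∧ seen.contains v = false then
      if v = 1 then [(v, h)] else (v, h) :: aRun L rest (seen.add v)
    else aRun L rest seen

theorem aRun_congr (L : Int) (l : List (Int × String × Int)) :
    ∀ s t : PySem.Set Int, (∀ x, s.contains x = t.contains x) → aRun L l s = aRun L l t := by
  induction l with
  | nil => intro s t _; rfl
  | cons x rest ih =>
    intro s t hst
    obtain ⟨_, h, v⟩ := x
    simp only [aRun, hst v]
    split_ifs with h1 h2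
    · rfl
    · refine congrArg _ (ih _ _ ?_)
      intro y
      have hy := hst y
      have hv := hst v
      simp only [PySem.Set.contains] at hy hv ⊢
      simp only [PySem.Set.add, PySem.Set.contains, hv]
      split_ifs
      · exact hy
      · simp only [List.contains_append, hy]
    · exact ih _ _ hst

theorem set_contains_add (s : PySem.Set Int) (a y : Int) :
    (s.add a).contains y = (s.contains y || y == a) := by
  simp only [PySem.Set.add]
  split_ifs with ha
  · cases hy : (y == a)
    · simp
    · have : y = a := eq_of_beq hy
      subst this
      simp only [ha, Bool.true_or]
  · have hde : decide (y = a) = (y == a) := by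
      cases hy : (y == a)
      · simp only [decide_eq_false_iff_not]; intro e; subst e; simp at hy
      · simp only [decide_eq_true_eq]; exact eq_of_beq hy
    simp [PySem.Set.contains, hde]

theorem aRun_contains_false (L : Int) (l : List (Int × String × Int)) :
    ∀ seen : PySem.Set Int, ∀ p ∈ aRun L l seen, seen.contains p.1 = false := by
  induction l with
  | nil => intro seen p hp; simp [aRun] at hp
  | cons x rest ih =>
    intro seen p hp
    obtain ⟨_, h, v⟩ := x
    simp only [aRun] at hp
    split_ifs at hp with h1 h2
    · rw [List.mem_singleton] at hp; subst hp; exact h1.2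
    · rcases List.mem_cons.1 hp with rfl | hp'
      · exact h1.2
      · have h3 := ih _ p hp'
        rw [set_contains_add] at h3
        exact (Bool.or_eq_false_iff.mp h3).1
    · exact ih _ p hp

-- collecting with v pre-seen (v ≠ 1) = collecting without, then dropping level v
theorem aRun_add (L : Int) (l : List (Int × String × Int)) :
    ∀ seen : PySem.Set Int, ∀ v : Int, v ≠ 1 → seen.contains v = false →
      aRun L l (seen.add v) = (aRun L l seen).filter (fun p => !(p.1 == v)) := by
  induction l with
  | nil => intro seen v _ _; rfl
  | cons x rest ih =>
    intro seen v hv1 hvs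
    obtain ⟨_, h, w⟩ := x
    by_cases hw : w = v
    · subst hw
      have h1 : (seen.add w).contains w = true := by rw [set_contains_add]; simp
      simp only [aRun, h1]
      rw [if_neg (by simp)]
      by_cases hwL : w < L
      · rw [if_pos ⟨hwL, hvs⟩, if_neg hv1]
        rw [List.filter_cons_of_neg (by simp)]
        refine (List.filter_eq_self.2 ?_).symm
        intro p hp
        have h3 := aRun_contains_false L rest (seen.add w) p hp
        rw [set_contains_add] at h3
        simpa using (Bool.or_eq_false_iff.mp h3).2
      · rw [if_neg (by tauto)]
        exact ih seen w hv1 hvs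
    · have hwv : (w == v) = false := by simp [hw]
      have hcc : (seen.add v).contains w = seen.contains w := by
        rw [set_contains_add, hwv, Bool.or_false]
      simp only [aRun, hcc]
      split_ifs with h1 h2
      · rw [List.filter_cons_of_pos (by simp [hwv]), List.filter_nil]
      · rw [List.filter_cons_of_pos (by simp [hwv])]
        refine congrArg (List.cons (w, h)) ?_
        rw [aRun_congr L rest ((seen.add v).add w) ((seen.add w).add v) ?_]
        · exact ih (seen.add w) v hv1
            (by rw [set_contains_add, hvs]; simp [Ne.symm hw])
        · intro y
          simp only [set_contains_add]
          cases seen.contains y <;> cases hy1 : (y == v) <;> cases hy2 : (y == w) <;> simp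
      · exact ih seen v hv1 hvs

-- A's loop over the countdown index range = aRun over the reversed prefix
theorem aLoop_eq_aRun (boundaries : List (Int × String × Int)) (L : Int) :
    ∀ n : Nat, n ≤ boundaries.length → ∀ (anc : List String) (seen : PySem.Set Int),
      aLoop boundaries L (PySem.List.pyRange ((n : Int) - 1) (-1) (-1)) anc seen
        = anc ++ (aRun L (boundaries.take n).reverse seen).map (·.2) := by
  intro n
  induction n with
  | zero =>
    intro _ anc seen
    rw [PySem.List.pyRange_neg_one_eq_nil (by omega)]
    simp [aLoop, aRun]
  | succ n ih =>
    intro hn anc seen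
    have hn' : n < boundaries.length := by omega
    rw [show (((n + 1 : Nat) : Int) - 1) = (n : Int) by push_cast; ring]
    rw [PySem.List.pyRange_neg_one_cons (by omega)]
    have hget : PySem.List.pyGet? boundaries (n : Int) = some boundaries[n] := by
      simp [PySem.List.pyGet?_natCast, List.getElem?_eq_getElem hn']
    have htake : (boundaries.take (n + 1)).reverse = boundaries[n] :: (boundaries.take n).reverse := by
      rw [List.take_add_one, List.getElem?_eq_getElem hn']
      simp
    rw [htake]
    rcases hb : boundaries[n] with ⟨a, h, v⟩
    rw [hb] at hget
    simp only [aLoop, hget, aRun]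
    split_ifs with h1 h2
    · simp
    · rw [ih (by omega)]; simp
    · rw [ih (by omega)]

-- the dict built by B's forward fold holds exactly A's collected pairs, reversed
theorem bFold_items (L : Int) (hL : 1 < L) :
    ∀ p : List (Int × String × Int),
      (p.foldl (bStep L) PySem.Dict.empty).items
        = (aRun L p.reverse PySem.Set.empty).reverse := by
  intro p
  induction p using List.reverseRecOn with
  | nil => rfl
  | append_singleton p x ih =>
    obtain ⟨a, h, w⟩ := x
    rw [List.foldl_append]
    simp only [List.foldl_cons, List.foldl_nil, List.reverse_append, List.reverse_singleton,
      List.singleton_append]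
    by_cases hw1 : w = 1
    · subst hw1
      simp only [aRun]
      rw [if_pos ⟨hL, rfl⟩, if_pos trivial]
      simp [bStep, PySem.Dict.insert, PySem.Dict.contains, PySem.Dict.empty]
    · by_cases hwL : w < L
      · simp only [aRun]
        rw [if_pos ⟨hwL, rfl⟩, if_neg hw1]
        rw [aRun_add L p.reverse PySem.Set.empty w hw1 rfl]
        simp only [bStep, if_neg hw1, if_pos hwL]
        have herase : ((p.foldl (bStep L) PySem.Dict.empty).erase w).contains w = false := by
          simp only [PySem.Dict.erase, PySem.Dict.contains, List.any_filter]
          simp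
        rw [PySem.Dict.items_insert_of_not_contains _ h herase]
        simp only [PySem.Dict.erase]
        rw [List.reverse_cons, ← List.filter_reverse, ← ih]
      · simp only [aRun]
        rw [if_neg (fun hc => hwL hc.1)]
        simp only [bStep, if_neg hw1, if_neg hwL]
        exact ih

-- ===== VERDICT (by name: the statement is the Claim_ definition above) =====
theorem build_heading_hierarchy_py_spec : Claim_equal_build_heading_hierarchy_py := by
  intro boundaries current_idx _
  show build_heading_hierarchy_py boundaries current_idx
      = build_heading_hierarchy_py_alt boundaries current_idx
  unfold build_heading_hierarchy_py build_heading_hierarchy_py_alt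
  by_cases hout : current_idx < 0 ∨ (boundaries.length : Int) ≤ current_idx
  · rw [if_pos hout, if_pos hout]
  · rw [if_neg hout, if_neg hout]
    push Not at hout
    obtain ⟨h0, hlen⟩ := hout
    set n : Nat := current_idx.toNat with hn
    have hcast : (n : Int) = current_idx := Int.toNat_of_nonneg h0
    have hnlen : n < boundaries.length := by omega
    have hget : PySem.List.pyGet? boundaries current_idx = some boundaries[n] := by
      rw [← hcast]
      simp [PySem.List.pyGet?_natCast, List.getElem?_eq_getElem hnlen]
    rcases hb : boundaries[n] with ⟨a, ch, cl⟩
    rw [hb] at hget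
    rw [hget]
    simp only
    by_cases hcl : cl ≤ 1
    · rw [if_pos hcl, if_pos hcl]
    · rw [if_neg hcl, if_neg hcl]
      have hL : 1 < cl := by omega
      have hslice : PySem.List.slice boundaries none (some current_idx) = boundaries.take n := by
        rw [PySem.List.slice_to boundaries h0]
      rw [hslice]
      rw [← hcast, aLoop_eq_aRun boundaries cl n (le_of_lt hnlen) [] PySem.Set.empty]
      have hXY : ((([] : List String) ++ (aRun cl (boundaries.take n).reverse PySem.Set.empty).map (·.2)).reverse)
          = ((boundaries.take n).foldl (bStep cl) PySem.Dict.empty).values := by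
        simp only [PySem.Dict.values, bFold_items cl hL, List.nil_append, List.map_reverse]
      rw [hXY]
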